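-- pv_equiv track=rewrite | github.com/timtimtim3/sf-fsa-vi | fsa/tasks_specification.py | concat_same_kind_symbols
-- ===== SOURCE A (Python) =====
-- def concat_same_kind_symbols(symbols):
--     new_symbols = []
--     kind_index = {}            # kind → index in new_symbols
--     orig_to_new = {}           # original index → new index
--
--     for i, symbol_list in enumerate(symbols):
--         sym = symbol_list[0]   # e.g. "C1" or "C2" or "M"
--         kind = sym[0]          # first character
--
--         if kind in kind_index:
--             idx = kind_index[kind]
--             new_symbols[idx].append(sym)
--         else:
--             idx = len(new_symbols)
--             kind_index[kind] = idx
--             new_symbols.append([sym])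
--
--         orig_to_new[i] = idx
--
--     return new_symbols, orig_to_new
-- ===== SOURCE B (Python) =====
-- def concat_same_kind_symbols(symbols):
--     # Different algorithm: instead of one grouping pass, compute the ordered list
--     # of distinct kinds, then build each group by a filtering scan per kind, and
--     # the index map via kinds.index.
--     firsts = [sl[0] for sl in symbols]
--     kinds = []
--     for s in firsts:
--         if s[0] not in kinds:
--             kinds.append(s[0])
--     new_symbols = [[s for s in firsts if s[0] == k] for k in kinds]
--     orig_to_new = {i: kinds.index(s[0]) for i, s in enumerate(firsts)}
--     return new_symbols, orig_to_new
-- ===== Notes on version B (the rewrite author's own statement) =====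
-- stated objective: alternative
-- what changed: A's single incremental loop maintaining three parallel structures is replaced by: first compute the ordered list of distinct kinds, then build each group by a separate filtering scan over the first symbols per kind, and the index map by kinds.index lookups.
import Mathlib
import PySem

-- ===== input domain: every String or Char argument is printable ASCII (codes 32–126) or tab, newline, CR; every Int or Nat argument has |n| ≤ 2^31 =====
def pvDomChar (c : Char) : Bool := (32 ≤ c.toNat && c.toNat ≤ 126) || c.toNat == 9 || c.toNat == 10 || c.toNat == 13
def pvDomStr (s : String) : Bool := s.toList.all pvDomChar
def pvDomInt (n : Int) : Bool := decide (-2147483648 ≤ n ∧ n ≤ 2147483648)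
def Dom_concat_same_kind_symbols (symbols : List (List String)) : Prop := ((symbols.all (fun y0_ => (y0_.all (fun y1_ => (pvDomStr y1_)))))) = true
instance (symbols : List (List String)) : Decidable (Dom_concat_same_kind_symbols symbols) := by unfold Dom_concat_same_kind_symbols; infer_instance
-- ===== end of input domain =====

-- B replaces A's single incremental loop (three parallel structures) by a different
-- algorithm: distinct-kinds list first, then one filtering scan per kind and
-- kinds.index lookups for the index map (objective: alternative).

-- ===== PORT A =====
-- sym = symbol_list[0]; kind = sym[0] — shared by both programs.
-- Under Pre_ the getD defaults never fire (Python raises IndexError exactly there).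
def pvSym (l : List String) : String := (PySem.List.pyGet? l 0).getD ""
def pvKind (s : String) : Char := (PySem.Str.pyGet? s 0).getD ' '

-- one iteration of A's loop; A's orig_to_new is a dict keyed by the distinct indices 0,1,2,…,
-- so each of its insertions is exactly a list append (a fresh key appends; exact)
def aStep (st : List (List String) × PySem.Dict Char Int × List (Int × Int))
    (p : Int × List String) : List (List String) × PySem.Dict Char Int × List (Int × Int) :=
  let sym := pvSym p.2
  let kind := pvKind sym
  match st.2.1.get? kind with
  | some idx => (st.1.modify idx.toNat (fun g => g ++ [sym]), st.2.1, st.2.2 ++ [(p.1, idx)])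
  | none =>
      let idx : Int := st.1.length
      (st.1 ++ [[sym]], st.2.1.insert kind idx, st.2.2 ++ [(p.1, idx)])

def concat_same_kind_symbols (symbols : List (List String)) : List (List String) × (List (Int × Int)) :=
  let st := (PySem.List.enumerate symbols).foldl aStep ([], PySem.Dict.empty, [])
  (st.1, st.2.2)

-- ===== PORT B =====
-- the `if s[0] not in kinds: kinds.append(s[0])` loop
def kindStep (ks : List Char) (s : String) : List Char :=
  if pvKind s ∈ ks then ks else ks ++ [pvKind s]

def concat_same_kind_symbols_alt (symbols : List (List String)) : List (List String) × (List (Int × Int)) :=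
  let firsts := symbols.map pvSym
  let kinds := firsts.foldl kindStep []
  let new_symbols := kinds.map (fun k => firsts.filter (fun s => pvKind s == k))
  -- {i: kinds.index(s[0]) …} over enumerate(firsts): keys 0,1,2,… are distinct, so the dict is this list
  let orig_to_new := (PySem.List.enumerate firsts).map
    (fun p => (p.1, (((PySem.List.index? kinds (pvKind p.2)).getD 0 : Nat) : Int)))
  (new_symbols, orig_to_new)

-- ===== PRECONDITION & SPEC =====
-- Pre_ excludes exactly the inputs where Python A raises IndexError: an empty symbol_list
-- (symbol_list[0]) or one whose first symbol is the empty string (sym[0]).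
def Pre_concat_same_kind_symbols (symbols : List (List String)) : Prop :=
  ∀ l ∈ symbols, l ≠ [] ∧ l.headD "" ≠ ""
instance (symbols : List (List String)) : Decidable (Pre_concat_same_kind_symbols symbols) := by
  unfold Pre_concat_same_kind_symbols; infer_instance

def pvWitness_concat_same_kind_symbols : List (List String) := [["C1"], ["M"], ["C2"]]

def Spec_concat_same_kind_symbols (symbols : List (List String)) (out : List (List String) × (List (Int × Int))) : Prop := out = concat_same_kind_symbols_alt symbols
instance (symbols : List (List String)) (out : List (List String) × (List (Int × Int))) : Decidable (Spec_concat_same_kind_symbols symbols out) := by unfold Spec_concat_same_kind_symbols; infer_instance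

-- ===== CLAIM (what is proved, stated in full; the proofs are below) =====
def Claim_equal_concat_same_kind_symbols : Prop := ∀ (symbols : List (List String)), Dom_concat_same_kind_symbols symbols → Pre_concat_same_kind_symbols symbols → Spec_concat_same_kind_symbols symbols (concat_same_kind_symbols symbols)

-- ===== LEMMAS AND PROOFS =====

-- B's groups, parametrised by the kind list (proof-only helper)
def grpsIn (fs : List String) (ks : List Char) : List (List String) :=
  ks.map (fun k => fs.filter (fun s => pvKind s == k))

-- the kinds fold only appends
theorem kinds_extend (rest : List String) : ∀ (ks : List Char),
    ∃ ext, rest.foldl kindStep ks = ks ++ ext := by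
  induction rest with
  | nil => intro ks; exact ⟨[], by simp⟩
  | cons s rest ih =>
    intro ks
    rw [List.foldl_cons, kindStep]
    split
    · exact ih ks
    · obtain ⟨e, he⟩ := ih (ks ++ [pvKind s])
      exact ⟨[pvKind s] ++ e, by rw [he, List.append_assoc]⟩

theorem index?_kinds_of_mem (rest : List String) (ks : List Char) (k : Char) (h : k ∈ ks) :
    PySem.List.index? (rest.foldl kindStep ks) k = PySem.List.index? ks k := by
  obtain ⟨e, he⟩ := kinds_extend rest ks
  rw [he, PySem.List.index?_append_of_mem e h]

theorem nodup_kinds (rest : List String) : ∀ (ks : List Char), ks.Nodup →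
    (rest.foldl kindStep ks).Nodup := by
  induction rest with
  | nil => intro ks h; simpa using h
  | cons s rest ih =>
    intro ks h
    rw [List.foldl_cons, kindStep]
    split
    · exact ih ks h
    · next hnm =>
      exact ih _ (by
        simp [List.nodup_append, h]
        exact fun a ha hh => hnm (hh ▸ ha))

theorem mem_kinds (rest : List String) : ∀ (ks : List Char) (x : String), x ∈ rest →
    pvKind x ∈ rest.foldl kindStep ks := by
  induction rest with
  | nil => intro ks x h; cases h
  | cons s rest ih =>
    intro ks x h
    rw [List.foldl_cons]
    rcases List.mem_cons.mp h with rfl | hm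
    · obtain ⟨e, he⟩ := kinds_extend rest (kindStep ks x)
      rw [he]
      rw [kindStep]
      split
      · exact List.mem_append_left e (by assumption)
      · exact List.mem_append_left e (by simp)
    · exact ih _ x hm

-- appending one string whose kind sits at index i of (nodup) ks modifies exactly group i
theorem grpsIn_append_mem (ps : List String) (s : String) : ∀ (ks : List Char), ∀ (i : Nat),
    ks.Nodup → PySem.List.index? ks (pvKind s) = some i →
    grpsIn (ps ++ [s]) ks = (grpsIn ps ks).modify i (fun g => g ++ [s]) := by
  intro ks
  induction ks with
  | nil => intro i _ h; rw [PySem.List.index?_eq_idxOf?] at h; simp [List.idxOf?] at h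
  | cons k0 ks ih =>
    intro i hnd hidx
    by_cases hk : k0 = pvKind s
    · subst hk
      rw [PySem.List.index?_cons_self] at hidx
      obtain rfl : i = 0 := by cases hidx; rfl
      have hfresh : ∀ k ∈ ks, ¬ ((pvKind s == k) = true) := by
        intro k hkm hbeq
        exact (List.nodup_cons.mp hnd).1 (beq_iff_eq.mp hbeq ▸ hkm)
      unfold grpsIn
      simp only [List.map_cons, List.modify_zero_cons]
      refine congrArg₂ List.cons ?_ ?_
      · simp [List.filter_append]
      · apply List.map_congr_left
        intro k hkm
        rw [List.filter_append]
        have : (fun s' => pvKind s' == k) s = false := by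
          simpa using fun h => hfresh k hkm (by simp [h])
        simp [this]
    · rw [PySem.List.index?_cons_of_ne _ hk] at hidx
      cases hj : PySem.List.index? ks (pvKind s) with
      | none => rw [hj] at hidx; simp at hidx
      | some j =>
        rw [hj] at hidx
        obtain rfl : i = j + 1 := by simp at hidx; omega
        unfold grpsIn
        simp only [List.map_cons, List.modify_succ_cons]
        refine congrArg₂ List.cons ?_ ?_
        · rw [List.filter_append]
          have hf : ((pvKind s == k0) : Bool) = false := by
            simp only [beq_eq_false_iff_ne, ne_eq]
            exact fun h => hk h.symm
          simp [hf]
        · exact ih j (List.nodup_cons.mp hnd).2 hj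

-- appending a string of a genuinely new kind appends a singleton group
theorem grpsIn_append_fresh (ps : List String) (s : String) (ks : List Char)
    (hnm : pvKind s ∉ ks) (hcov : ∀ x ∈ ps, pvKind x ∈ ks) :
    grpsIn (ps ++ [s]) (ks ++ [pvKind s]) = grpsIn ps ks ++ [[s]] := by
  unfold grpsIn
  rw [List.map_append]
  have h1 : ks.map (fun k => (ps ++ [s]).filter (fun s' => pvKind s' == k))
      = ks.map (fun k => ps.filter (fun s' => pvKind s' == k)) := by
    apply List.map_congr_left
    intro k hkm
    rw [List.filter_append]
    have hf : ((pvKind s == k) : Bool) = false := by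
      simp only [beq_eq_false_iff_ne, ne_eq]
      intro h; exact hnm (h ▸ hkm)
    simp [hf]
  have hempty : ps.filter (fun s' => pvKind s' == pvKind s) = [] := by
    rw [List.filter_eq_nil_iff]
    intro x hx
    simp only [beq_iff_eq]
    intro h
    exact hnm (h ▸ hcov x hx)
  rw [h1]
  simp [List.filter_append, List.filter_cons, hempty]

-- enumerate over a mapped list
theorem enumerate_map {α β : Type} (f : α → β) (xs : List α) : ∀ (n : Int),
    PySem.List.enumerate (xs.map f) n = (PySem.List.enumerate xs n).map (fun p => (p.1, f p.2)) := by
  induction xs with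
  | nil => intro n; simp [PySem.List.enumerate_nil]
  | cons x xs ih => intro n; simp [PySem.List.enumerate_cons, ih]

-- the kinds of every processed string are covered
theorem cov_kinds (ps : List String) : ∀ x ∈ ps, pvKind x ∈ ps.foldl kindStep [] := by
  intro x hx; exact mem_kinds ps [] x hx

-- the loop invariant: A's fold state against B's staged description
theorem loop_inv (rest : List (List String)) : ∀ (n : Int) (ps : List String)
    (acc : List (Int × Int)) (d : PySem.Dict Char Int),
    (∀ k, d.get? k = (PySem.List.index? (ps.foldl kindStep []) k).map (fun i : Nat => (i : Int))) →
    ∃ d',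
    (PySem.List.enumerate rest n).foldl aStep (grpsIn ps (ps.foldl kindStep []), d, acc)
      = (grpsIn (ps ++ rest.map pvSym) ((ps ++ rest.map pvSym).foldl kindStep []),
         d',
         acc ++ (PySem.List.enumerate rest n).map
           (fun p => (p.1, (((PySem.List.index? ((ps ++ rest.map pvSym).foldl kindStep [])
               (pvKind (pvSym p.2))).getD 0 : Nat) : Int)))) := by
  induction rest with
  | nil =>
    intro n ps acc d _
    exact ⟨d, by simp [PySem.List.enumerate_nil]⟩
  | cons l rest ih =>
    intro n ps acc d hd
    rw [PySem.List.enumerate_cons]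
    simp only [List.foldl_cons, List.map_cons]
    have hndK : (ps.foldl kindStep []).Nodup := nodup_kinds ps [] List.nodup_nil
    have htot : ps ++ pvSym l :: rest.map pvSym = (ps ++ [pvSym l]) ++ rest.map pvSym := by
      simp
    rw [htot]
    cases hio : PySem.List.index? (ps.foldl kindStep []) (pvKind (pvSym l)) with
    | some i =>
      have hmem : pvKind (pvSym l) ∈ ps.foldl kindStep [] := by
        rw [← PySem.List.index?_isSome_iff (v := pvKind (pvSym l))]
        rw [hio]; rfl
      have hK' : (ps ++ [pvSym l]).foldl kindStep [] = ps.foldl kindStep [] := by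
        rw [List.foldl_append, List.foldl_cons, List.foldl_nil, kindStep, if_pos hmem]
      have hstep : aStep (grpsIn ps (ps.foldl kindStep []), d, acc) (n, l)
          = (grpsIn (ps ++ [pvSym l]) ((ps ++ [pvSym l]).foldl kindStep []), d,
             acc ++ [(n, ((i : Nat) : Int))]) := by
        have hget : d.get? (pvKind (pvSym l)) = some ((i : Nat) : Int) := by
          rw [hd, hio]; rfl
        rw [hK', grpsIn_append_mem ps (pvSym l) _ i hndK hio]
        simp [aStep, hget]
      rw [hstep]
      obtain ⟨d', hrec⟩ := ih (n + 1) (ps ++ [pvSym l]) (acc ++ [(n, ((i : Nat) : Int))]) d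
        (by intro k; rw [hK']; exact hd k)
      refine ⟨d', hrec.trans ?_⟩
      have hfin : PySem.List.index? (((ps ++ [pvSym l]) ++ rest.map pvSym).foldl kindStep [])
          (pvKind (pvSym l)) = some i := by
        rw [List.foldl_append (l := ps ++ [pvSym l]), hK']
        rw [index?_kinds_of_mem (rest.map pvSym) _ _ hmem, hio]
      rw [hfin]
      simp
    | none =>
      have hnmem : pvKind (pvSym l) ∉ ps.foldl kindStep [] :=
        (PySem.List.index?_eq_none_iff _ _).mp hio
      have hK' : (ps ++ [pvSym l]).foldl kindStep []
          = ps.foldl kindStep [] ++ [pvKind (pvSym l)] := by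
        rw [List.foldl_append, List.foldl_cons, List.foldl_nil, kindStep, if_neg hnmem]
      have hlen : (grpsIn ps (ps.foldl kindStep [])).length = (ps.foldl kindStep []).length := by
        simp [grpsIn]
      have hstep : aStep (grpsIn ps (ps.foldl kindStep []), d, acc) (n, l)
          = (grpsIn (ps ++ [pvSym l]) ((ps ++ [pvSym l]).foldl kindStep []),
             d.insert (pvKind (pvSym l)) (((ps.foldl kindStep []).length : Nat) : Int),
             acc ++ [(n, (((ps.foldl kindStep []).length : Nat) : Int))]) := by
        have hget : d.get? (pvKind (pvSym l)) = none := by rw [hd, hio]; rfl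
        rw [hK', grpsIn_append_fresh ps (pvSym l) _ hnmem (cov_kinds ps)]
        simp [aStep, hget, hlen]
      rw [hstep]
      have hd2 : ∀ k, (d.insert (pvKind (pvSym l)) (((ps.foldl kindStep []).length : Nat) : Int)).get? k
          = (PySem.List.index? ((ps ++ [pvSym l]).foldl kindStep []) k).map (fun i : Nat => (i : Int)) := by
        intro k
        rw [hK']
        by_cases hk : k = pvKind (pvSym l)
        · subst hk
          rw [PySem.Dict.get?_insert_self,
            PySem.List.index?_append_singleton_self _ _ hnmem]
          rfl
        · rw [PySem.Dict.get?_insert_of_ne _ _ hk, hd]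
          by_cases hkm : k ∈ ps.foldl kindStep []
          · rw [PySem.List.index?_append_of_mem _ hkm]
          · rw [(PySem.List.index?_eq_none_iff _ _).mpr hkm,
              (PySem.List.index?_eq_none_iff _ _).mpr (by
                intro hc
                rcases List.mem_append.mp hc with h | h
                · exact hkm h
                · exact hk (List.mem_singleton.mp h))]
      obtain ⟨d', hrec⟩ := ih (n + 1) (ps ++ [pvSym l]) _ _ hd2
      refine ⟨d', hrec.trans ?_⟩
      have hmem' : pvKind (pvSym l) ∈ (ps ++ [pvSym l]).foldl kindStep [] := by
        rw [hK']; simp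
      have hfin : PySem.List.index? (((ps ++ [pvSym l]) ++ rest.map pvSym).foldl kindStep [])
          (pvKind (pvSym l)) = some (ps.foldl kindStep []).length := by
        rw [List.foldl_append (l := ps ++ [pvSym l])]
        rw [index?_kinds_of_mem (rest.map pvSym) _ _ hmem', hK',
          PySem.List.index?_append_singleton_self _ _ hnmem]
      rw [hfin]
      simp

-- ===== VERDICT (by name: the statement is the Claim_ definition above) =====
theorem concat_same_kind_symbols_spec : Claim_equal_concat_same_kind_symbols := by
  intro symbols _ _
  unfold Spec_concat_same_kind_symbols concat_same_kind_symbols concat_same_kind_symbols_alt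
  obtain ⟨d', hrec⟩ := loop_inv symbols 0 [] [] PySem.Dict.empty
    (by intro k; rw [PySem.Dict.get?_empty]; rfl)
  have h0 : grpsIn ([] : List String) (([] : List String).foldl kindStep []) = [] := rfl
  rw [h0] at hrec
  rw [hrec]
  simp only [List.nil_append]
  refine Prod.ext rfl ?_
  simp only []
  rw [enumerate_map pvSym symbols 0, List.map_map]
  rfl
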